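-- pv_equiv track=rewrite | github.com/projeto-de-algoritmos/Grafos2-DurvalCarvalho_VictorMoura | api/fetch_data.py | get_valid_paths
-- ===== SOURCE A (Python) =====
-- from collections import defaultdict
--
-- def dfs(at, root_node, valid_paths, adj_list, visited):
--
--     if visited[at]:
--         return valid_paths
--
--     visited[at] = True
--
--     valid_paths[root_node].add(at)
--
--     for n in adj_list[at]:
--         valid_paths = dfs(n, root_node, valid_paths, adj_list, visited)
--
--     return valid_paths
--
-- def get_valid_paths(edges):
--
--     adj_list = defaultdict(set)
--     valid_paths = defaultdict(set)
--
--     for v, u, w in edges: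
--         adj_list[v].add(u)
--
--     for u in adj_list:
--         visited = defaultdict(lambda:False)
--         valid_paths = dfs(u, u, valid_paths, adj_list, visited)
--
--     return valid_paths
-- ===== SOURCE B (Python) =====
-- def get_valid_paths(edges):
--     adj = {}
--     for v, u, w in edges:
--         ns = adj.setdefault(v, [])
--         if u not in ns:
--             ns.append(u)
--
--     valid_paths = {}
--     for u in adj:
--         visited = set()
--         stack = [u]
--         while stack:
--             x = stack.pop()
--             if x not in visited:
--                 visited.add(x)
--                 stack.extend(reversed(adj[x]))
--         valid_paths[u] = visited
--     return valid_paths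
-- ===== Notes on version B (the rewrite author's own statement) =====
-- stated objective: idiomatic
-- what changed: A's recursive dfs helper (one recursive call per neighbour, a shared valid_paths dict threaded through the recursion and a defaultdict visited per source) is replaced by an iterative DFS over an explicit stack with a visited set per source; the visited set itself becomes that source's reachable set, so the dfs helper and the state threading disappear.
import Mathlib
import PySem

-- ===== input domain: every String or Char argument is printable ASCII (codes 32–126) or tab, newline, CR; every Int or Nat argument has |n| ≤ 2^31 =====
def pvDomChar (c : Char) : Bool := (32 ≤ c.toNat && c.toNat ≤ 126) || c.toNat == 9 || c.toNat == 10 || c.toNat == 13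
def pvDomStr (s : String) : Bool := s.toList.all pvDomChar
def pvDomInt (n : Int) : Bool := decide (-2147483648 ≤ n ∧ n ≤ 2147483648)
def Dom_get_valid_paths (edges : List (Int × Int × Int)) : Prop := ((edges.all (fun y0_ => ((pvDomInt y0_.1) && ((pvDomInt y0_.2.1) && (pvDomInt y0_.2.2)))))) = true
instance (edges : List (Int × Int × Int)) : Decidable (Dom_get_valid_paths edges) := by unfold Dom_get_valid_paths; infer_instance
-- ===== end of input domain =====

-- B replaces A's recursive per-source DFS by an iterative stack-based DFS (idiomatic, no
-- recursion); same asymptotic cost.  Both Pythons only mutate their own local containers,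
-- so return-value equivalence is full equivalence.

-- ===== PORT A =====
-- A's dfs recursion terminates in Python because `visited` only grows; the port carries a
-- fuel counter bounding the recursion depth (a totality guard only: the proof shows fuel
-- edges.length+1 is never exhausted on inputs satisfying Pre_).  `visited[at]` on
-- defaultdict(lambda:False) is read as getD at false (the defaultdict's write-on-read is
-- unobservable: visited is local and only ever read through the same default).
def dfs (fuel : Nat) (at_ root_node : Int) (valid_paths : PySem.Dict Int (PySem.Set Int))
    (adj_list : PySem.Dict Int (PySem.Set Int)) (visited : PySem.Dict Int Bool) :
    PySem.Dict Int (PySem.Set Int) × PySem.Dict Int Bool :=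
  match fuel with
  | 0 => (valid_paths, visited)   -- never reached for the fuel get_valid_paths supplies (proved below)
  | f + 1 =>
    if visited.getD at_ false then (valid_paths, visited)
    else
      let visited := visited.insert at_ true
      let valid_paths := valid_paths.modify root_node PySem.Set.empty (fun s => PySem.Set.add s at_)
      (adj_list.getD at_ PySem.Set.empty).foldl
        (fun st n => dfs f n root_node st.1 adj_list st.2) (valid_paths, visited)

def get_valid_paths (edges : List (Int × Int × Int)) : List (Int × List Int) :=
  let adj_list := edges.foldl
    (fun d e => d.modify e.1 PySem.Set.empty (fun s => PySem.Set.add s e.2.1)) PySem.Dict.empty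
  let valid_paths := adj_list.keys.foldl
    (fun vp u => (dfs (edges.length + 1) u u vp adj_list PySem.Dict.empty).1) PySem.Dict.empty
  valid_paths.items

-- ===== PORT B =====
-- helper facts cited by the while-loop's termination measure (decreasing_by below)
def pvUnvisited (univ : List Int) (vis : PySem.Set Int) : Nat :=
  univ.countP (fun k => !(PySem.Set.contains vis k))

theorem pvContains_add (vis : PySem.Set Int) (x a : Int) :
    PySem.Set.contains (PySem.Set.add vis x) a = true ↔
      (PySem.Set.contains vis a = true ∨ a = x) := by
  rw [PySem.Set.contains_iff, PySem.Set.mem_add, PySem.Set.contains_iff]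

theorem pvUnvisited_add_le (univ : List Int) (vis : PySem.Set Int) (x : Int) :
    pvUnvisited univ (PySem.Set.add vis x) ≤ pvUnvisited univ vis := by
  apply List.countP_mono_left
  intro a _ h
  simp only [Bool.not_eq_true'] at h ⊢
  rcases hc : PySem.Set.contains vis a with _ | _
  · rfl
  · have h2 := (pvContains_add vis x a).mpr (Or.inl hc)
    rw [h] at h2; cases h2

theorem pvUnvisited_add_lt (univ : List Int) (vis : PySem.Set Int) (x : Int)
    (hx : x ∈ univ) (hv : x ∉ vis) :
    pvUnvisited univ (PySem.Set.add vis x) < pvUnvisited univ vis := by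
  obtain ⟨l1, l2, rfl⟩ := List.append_of_mem hx
  unfold pvUnvisited at *
  simp only [List.countP_append, List.countP_cons]
  have h1 := pvUnvisited_add_le l1 vis x
  have h2 := pvUnvisited_add_le l2 vis x
  unfold pvUnvisited at h1 h2
  have hxa : PySem.Set.contains (PySem.Set.add vis x) x = true :=
    (pvContains_add vis x x).mpr (Or.inr rfl)
  have hxv : PySem.Set.contains vis x = false := by
    rcases hc : PySem.Set.contains vis x with _ | _
    · rfl
    · exact absurd ((PySem.Set.contains_iff vis x).mp hc) hv
  simp only [hxa, hxv, Bool.not_true, Bool.not_false, if_true]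
  simp only [Bool.false_eq_true, if_false]
  omega

-- Source B's while loop: the stack is a List with its TOP at the HEAD (Source B pushes the
-- neighbours reversed onto the end and pops from the end, i.e. prepends them in order and
-- pops the head); `visited` doubles as the result set, exactly as in Source B.  adj[x] is
-- get?; its none case is Python's KeyError (the loop stops there; under Pre_ it is
-- unreachable, since every reachable node is a key of adj).
def get_valid_paths_loop (adj : PySem.Dict Int (PySem.Set Int)) (stack : List Int)
    (visited : PySem.Set Int) : PySem.Set Int :=
  match stack with
  | [] => visited
  | x :: rest =>
    if hx : PySem.Set.contains visited x then get_valid_paths_loop adj rest visited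
    else
      match hm : adj.get? x with
      | some ns => get_valid_paths_loop adj (ns ++ rest) (PySem.Set.add visited x)
      | none => PySem.Set.add visited x   -- KeyError in Source B; outside Pre_ only
termination_by (pvUnvisited adj.keys visited, stack.length)
decreasing_by
  · exact Prod.Lex.right _ (by simp)
  · have hc : adj.contains x = true := by
      rw [PySem.Dict.contains_eq_isSome_get?, hm]; rfl
    exact Prod.Lex.left _ _ (pvUnvisited_add_lt _ _ _
      ((PySem.Dict.contains_iff_mem_keys adj x).mp hc)
      (fun hmem => hx ((PySem.Set.contains_iff visited x).mpr hmem)))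

def get_valid_paths_alt (edges : List (Int × Int × Int)) : List (Int × List Int) :=
  let adj := edges.foldl
    (fun d e =>
      let d := d.setdefault e.1 []
      let ns := d.getD e.1 []
      if e.2.1 ∈ ns then d else d.insert e.1 (ns ++ [e.2.1]))
    PySem.Dict.empty
  let valid_paths := adj.keys.foldl
    (fun res u => res.insert u (get_valid_paths_loop adj [u] PySem.Set.empty)) PySem.Dict.empty
  valid_paths.items

-- ===== PRECONDITION & SPEC =====
-- Pre_ excludes exactly the inputs on which A raises RuntimeError ("dictionary changed size
-- during iteration"): whenever some edge target has no outgoing edge, the DFS reads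
-- adj_list[target], the defaultdict inserts that missing key, and the running
-- `for u in adj_list` iteration raises at its next step.  On every other input A returns.
-- (B raises a KeyError on exactly the same inputs: its adj[x] lookup hits the same missing
-- key; so both programs return on exactly the inputs Pre_ admits.)
def Pre_get_valid_paths (edges : List (Int × Int × Int)) : Prop :=
  ∀ e ∈ edges, e.2.1 ∈ edges.map (·.1)
instance (edges : List (Int × Int × Int)) : Decidable (Pre_get_valid_paths edges) := by
  unfold Pre_get_valid_paths; infer_instance
def pvWitness_get_valid_paths : (List (Int × Int × Int)) := [(1, 2, 5), (2, 1, 3)]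

def Spec_get_valid_paths (edges : List (Int × Int × Int)) (out : List (Int × List Int)) : Prop := out = get_valid_paths_alt edges
instance (edges : List (Int × Int × Int)) (out : List (Int × List Int)) : Decidable (Spec_get_valid_paths edges out) := by unfold Spec_get_valid_paths; infer_instance

-- ===== CLAIM (what is proved, stated in full; the proofs are below) =====
def Claim_equal_get_valid_paths : Prop := ∀ (edges : List (Int × Int × Int)), Dom_get_valid_paths edges → Pre_get_valid_paths edges → Spec_get_valid_paths edges (get_valid_paths edges)

-- ===== LEMMAS AND PROOFS =====
theorem pvGet?_of_contains {d : PySem.Dict Int (PySem.Set Int)} {k : Int}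
    (hc : d.contains k = true) : d.get? k = some (d.getD k PySem.Set.empty) := by
  rw [PySem.Dict.contains_eq_isSome_get?] at hc
  obtain ⟨v, hv⟩ := Option.isSome_iff_exists.mp hc
  rw [hv, PySem.Dict.getD_of_get?_eq_some d _ hv]

theorem pvLoop_append (adj : PySem.Dict Int (PySem.Set Int))
    (hclosed : ∀ k : Int, ∀ n ∈ adj.getD k PySem.Set.empty, adj.contains n = true)
    (a : List Int) (vis : PySem.Set Int) :
    ∀ b : List Int, (∀ n ∈ a, adj.contains n = true) →
    get_valid_paths_loop adj (a ++ b) vis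
      = get_valid_paths_loop adj b (get_valid_paths_loop adj a vis) := by
  induction a, vis using get_valid_paths_loop.induct adj with
  | case1 vis => intro b _; simp [get_valid_paths_loop]
  | case2 vis x rest hx ih =>
      intro b ha
      simp only [List.cons_append, get_valid_paths_loop, dif_pos hx]
      exact ih b (fun n hn => ha n (List.mem_cons_of_mem _ hn))
  | case3 vis x rest hx ns hm ih =>
      intro b ha
      simp only [List.cons_append, get_valid_paths_loop, dif_neg hx]
      cases hmm : adj.get? x with
      | none => rw [hm] at hmm; cases hmm
      | some ns' =>
          rw [hm] at hmm
          injection hmm with he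
          subst he
          dsimp only
          rw [← List.append_assoc]
          refine ih b (fun n hn => ?_)
          rcases List.mem_append.mp hn with h | h
          · have hg : ns = adj.getD x PySem.Set.empty := by
              rw [PySem.Dict.getD_eq_get?_getD, hm]; rfl
            exact hclosed x n (hg ▸ h)
          · exact ha n (List.mem_cons_of_mem _ h)
  | case4 vis x rest hx hm =>
      intro b ha
      have hc := ha x List.mem_cons_self
      rw [PySem.Dict.contains_eq_isSome_get?, hm] at hc
      cases hc

theorem pvLoop_mono (adj : PySem.Dict Int (PySem.Set Int)) (ns : List Int)
    (vis : PySem.Set Int) (y : Int) (hy : y ∈ vis) :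
    y ∈ get_valid_paths_loop adj ns vis := by
  induction ns, vis using get_valid_paths_loop.induct adj with
  | case1 vis => rw [get_valid_paths_loop]; exact hy
  | case2 vis x rest hx ih => rw [get_valid_paths_loop, dif_pos hx]; exact ih hy
  | case3 vis x rest hx ns hm ih =>
      rw [get_valid_paths_loop, dif_neg hx]
      cases hmm : adj.get? x with
      | none => rw [hm] at hmm; cases hmm
      | some ns' =>
          rw [hm] at hmm
          injection hmm with he
          subst he
          dsimp only
          exact ih ((PySem.Set.mem_add vis x y).mpr (Or.inl hy))
  | case4 vis x rest hx hm =>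
      rw [get_valid_paths_loop, dif_neg hx]
      cases hmm : adj.get? x with
      | none => dsimp only; exact (PySem.Set.mem_add vis x y).mpr (Or.inl hy)
      | some ns' => rw [hm] at hmm; cases hmm

def pvMkTrue (l : List Int) : PySem.Dict Int Bool :=
  PySem.Dict.mk (l.map (fun x => (x, true)))

theorem pvSetContains_eq (l : PySem.Set Int) (n : Int) :
    PySem.Set.contains l n = decide (n ∈ l) := by
  rcases hc : PySem.Set.contains l n with _ | _
  · have hm : n ∉ l := fun hm => by
      rw [(PySem.Set.contains_iff l n).mpr hm] at hc; cases hc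
    simp [hm]
  · simp [(PySem.Set.contains_iff l n).mp hc]

theorem pvMkTrue_get? (l : List Int) (n : Int) :
    (pvMkTrue l).get? n = if n ∈ l then some true else none := by
  induction l with
  | nil => rfl
  | cons x t ih =>
      show (PySem.Dict.mk ((x, true) :: t.map (fun x => (x, true)))).get? n = _
      rw [PySem.Dict.get?_mk_cons]
      by_cases h : x = n
      · subst h; simp
      · have hb : (x == n) = false := by simp [h]
        rw [hb]
        simp only [Bool.false_eq_true, if_false]
        rw [show ({ items := t.map (fun x => (x, true)) } : PySem.Dict Int Bool) = pvMkTrue t from rfl, ih]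
        have : (n ∈ x :: t) ↔ n ∈ t := by
          constructor
          · intro hm; rcases List.mem_cons.mp hm with h' | h'
            · exact absurd h'.symm h
            · exact h'
          · exact fun hm => List.mem_cons_of_mem _ hm
        by_cases hm : n ∈ t <;> simp [hm, this]

theorem pvMkTrue_getD (l : List Int) (n : Int) :
    (pvMkTrue l).getD n false = PySem.Set.contains l n := by
  rw [PySem.Dict.getD_eq_get?_getD, pvMkTrue_get?, pvSetContains_eq]
  by_cases h : n ∈ l <;> simp [h]

theorem pvMkTrue_contains (l : List Int) (n : Int) :
    (pvMkTrue l).contains n = PySem.Set.contains l n := by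
  rw [PySem.Dict.contains_eq_isSome_get?, pvMkTrue_get?, pvSetContains_eq]
  by_cases h : n ∈ l <;> simp [h]

theorem pvMkTrue_insert (l : List Int) (n : Int) (hn : n ∉ l) :
    (pvMkTrue l).insert n true = pvMkTrue (l ++ [n]) := by
  apply PySem.Dict.ext
  rw [PySem.Dict.items_insert_of_not_contains]
  · show (l.map (fun x => (x, true))) ++ [(n, true)] = (l ++ [n]).map (fun x => (x, true))
    simp
  · rw [pvMkTrue_contains, pvSetContains_eq]
    simp [hn]


theorem pvUnvisited_le_of_subset (univ : List Int) (v w : PySem.Set Int)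
    (h : ∀ y ∈ v, y ∈ w) : pvUnvisited univ w ≤ pvUnvisited univ v := by
  apply List.countP_mono_left
  intro a _ ha
  simp only [Bool.not_eq_true'] at ha ⊢
  rcases hc : PySem.Set.contains v a with _ | _
  · rfl
  · have : PySem.Set.contains w a = true :=
      (PySem.Set.contains_iff w a).mpr (h a ((PySem.Set.contains_iff v a).mp hc))
    rw [this] at ha; cases ha

theorem pvMain (adj : PySem.Dict Int (PySem.Set Int))
    (hclosed : ∀ k : Int, ∀ n ∈ adj.getD k PySem.Set.empty, adj.contains n = true) :
    ∀ (k : Nat) (ns : List Int) (visB : PySem.Set Int),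
      pvUnvisited adj.keys visB ≤ k →
      (∀ n ∈ ns, adj.contains n = true) →
      ∀ (vp0 : PySem.Dict Int (PySem.Set Int)) (u : Int) (f : Nat),
        pvUnvisited adj.keys visB < f →
        ns.foldl (fun st n => dfs f n u st.1 adj st.2) (vp0.insert u visB, pvMkTrue visB)
          = (vp0.insert u (get_valid_paths_loop adj ns visB),
             pvMkTrue (get_valid_paths_loop adj ns visB)) := by
  intro k
  induction k using Nat.strong_induction_on with
  | _ k IH =>
  intro ns
  induction ns with
  | nil =>
      intro visB _ _ vp0 u f _
      rw [get_valid_paths_loop]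
      rfl
  | cons n rest ihrest =>
      intro visB hk hns vp0 u f hf
      simp only [List.foldl_cons]
      obtain ⟨f, rfl⟩ : ∃ f', f = f' + 1 := ⟨f - 1, by omega⟩
      by_cases hmem : n ∈ visB
      · -- already visited: dfs returns the state unchanged, the loop skips n
        have hvis : (pvMkTrue visB).getD n false = true := by
          rw [pvMkTrue_getD, pvSetContains_eq]; simp [hmem]
        have hcont : PySem.Set.contains visB n = true := by
          rw [pvSetContains_eq]; simp [hmem]
        have hdfs : dfs (f + 1) n u (vp0.insert u visB) adj (pvMkTrue visB)
            = (vp0.insert u visB, pvMkTrue visB) := by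
          rw [dfs, hvis]; simp
        rw [hdfs]
        rw [get_valid_paths_loop, dif_pos hcont]
        exact ihrest visB hk (fun m hm => hns m (List.mem_cons_of_mem _ hm)) vp0 u (f+1) hf
      · -- fresh node: dfs marks it and recurses over its neighbours with fuel f
        have hvis : (pvMkTrue visB).getD n false = false := by
          rw [pvMkTrue_getD, pvSetContains_eq]; simp [hmem]
        have hcont : PySem.Set.contains visB n = false := by
          rw [pvSetContains_eq]; simp [hmem]
        have hadd : PySem.Set.add visB n = visB ++ [n] := PySem.Set.add_of_not_mem hmem
        have hn' : adj.contains n = true := hns n List.mem_cons_self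
        have hkeys : n ∈ adj.keys := (PySem.Dict.contains_iff_mem_keys adj n).mp hn'
        have hlt : pvUnvisited adj.keys (PySem.Set.add visB n) < pvUnvisited adj.keys visB :=
          pvUnvisited_add_lt _ _ _ hkeys hmem
        have hkpos : 0 < k := by omega
        have hdfs : dfs (f + 1) n u (vp0.insert u visB) adj (pvMkTrue visB)
            = (adj.getD n PySem.Set.empty).foldl
                (fun st m => dfs f m u st.1 adj st.2)
                ((vp0.insert u (PySem.Set.add visB n)), pvMkTrue (PySem.Set.add visB n)) := by
          rw [dfs, hvis]
          simp only [Bool.false_eq_true, if_false]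
          congr 1
          · show ((vp0.insert u visB).insert u
                (PySem.Set.add ((vp0.insert u visB).getD u PySem.Set.empty) n),
                (pvMkTrue visB).insert n true) = _
            rw [PySem.Dict.getD_insert_self, PySem.Dict.insert_insert_self,
                pvMkTrue_insert visB n hmem, hadd]
        rw [hdfs]
        -- neighbours by the outer IH at k-1
        have hnbrs := IH (k-1) (by omega) (adj.getD n PySem.Set.empty)
          (PySem.Set.add visB n) (by omega) (hclosed n) vp0 u f (by omega)
        rw [hnbrs]
        set W := get_valid_paths_loop adj (adj.getD n PySem.Set.empty) (PySem.Set.add visB n)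
          with hW
        -- rest of the worklist by the outer IH at k-1 again
        have hWle : pvUnvisited adj.keys W ≤ pvUnvisited adj.keys (PySem.Set.add visB n) :=
          pvUnvisited_le_of_subset _ _ _ (fun y hy => pvLoop_mono adj _ _ y hy)
        have hrest := IH (k-1) (by omega) rest W (by omega)
          (fun m hm => hns m (List.mem_cons_of_mem _ hm)) vp0 u (f+1) (by omega)
        rw [hrest]
        rw [get_valid_paths_loop, dif_neg (by rw [hcont]; exact Bool.false_ne_true)]
        cases hmm : adj.get? n with
        | none => rw [pvGet?_of_contains hn'] at hmm; cases hmm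
        | some ns' =>
            have he := (pvGet?_of_contains hn').symm.trans hmm
            injection he with he
            subst he
            dsimp only
            rw [pvLoop_append adj hclosed _ _ rest (hclosed n)]

-- ===== adjacency facts =====
theorem pvEmpty_eq : PySem.Set.empty = ([] : List Int) := rfl

theorem pvInsert_getD_self (d : PySem.Dict Int (PySem.Set Int)) (k : Int)
    (hc : d.contains k = true) (hnd : d.keys.Nodup) :
    d.insert k (d.getD k ([] : List Int)) = d := by
  apply PySem.Dict.ext
  rw [PySem.Dict.items_insert_of_contains d _ hc]
  have h1 : ∀ p ∈ d.items,
      (fun p : Int × PySem.Set Int =>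
        if (p.1 == k) = true then (k, d.getD k ([] : List Int)) else p) p = p := by
    intro p hp
    by_cases h : p.1 = k
    · have h2 : d.getD k ([] : List Int) = p.2 := by
        apply PySem.Dict.getD_of_mem_items _ _ hnd
        rw [← h]; exact hp
      simp only [h, BEq.rfl, if_true, h2]
      exact Prod.ext h.symm rfl
    · simp [h]
  rw [List.map_congr_left h1]
  simp

theorem pvStep_eq (d : PySem.Dict Int (PySem.Set Int)) (e : Int × Int × Int)
    (hnd : d.keys.Nodup) :
    (let d1 := d.setdefault e.1 ([] : List Int)
     let ns := d1.getD e.1 ([] : List Int)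
     if e.2.1 ∈ ns then d1 else d1.insert e.1 (ns ++ [e.2.1]))
    = d.modify e.1 PySem.Set.empty (fun s => PySem.Set.add s e.2.1) := by
  show _ = d.insert e.1 (PySem.Set.add (d.getD e.1 PySem.Set.empty) e.2.1)
  simp only [pvEmpty_eq]
  rcases hc : d.contains e.1 with _ | _
  · rw [PySem.Dict.setdefault_of_not_contains d _ hc]
    simp only [PySem.Dict.getD_insert_self]
    have : e.2.1 ∉ ([] : List Int) := List.not_mem_nil
    simp only [this, if_false]
    rw [PySem.Dict.insert_insert_self]
    rw [PySem.Dict.getD_of_not_contains d _ hc]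
    rfl
  · rw [PySem.Dict.setdefault_of_contains d _ hc]
    by_cases hm : e.2.1 ∈ d.getD e.1 ([] : List Int)
    · simp only [hm, if_true]
      rw [PySem.Set.add_of_mem hm]
      exact (pvInsert_getD_self d e.1 hc hnd).symm
    · simp only [hm, if_false]
      rw [PySem.Set.add_of_not_mem hm]

theorem pvKeys_modify_nodup (d : PySem.Dict Int (PySem.Set Int)) (k : Int)
    (d0 : PySem.Set Int) (f : PySem.Set Int → PySem.Set Int) (hnd : d.keys.Nodup) :
    (d.modify k d0 f).keys.Nodup := by
  show (d.insert k (f (d.getD k d0))).keys.Nodup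
  rcases hc : d.contains k with _ | _
  · rw [PySem.Dict.keys_insert_of_not_contains d _ hc]
    have hk : k ∉ d.keys := fun hm => by
      rw [(PySem.Dict.contains_iff_mem_keys d k).mpr hm] at hc; cases hc
    rw [List.nodup_append]
    refine ⟨hnd, List.nodup_singleton k, ?_⟩
    intro a ha b hb
    rw [List.mem_singleton] at hb
    exact fun he => hk ((he.trans hb) ▸ ha)
  · rw [PySem.Dict.keys_insert_of_contains d _ hc]; exact hnd

theorem pvAdj_eq (edges : List (Int × Int × Int)) :
    ∀ d : PySem.Dict Int (PySem.Set Int), d.keys.Nodup →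
    edges.foldl
      (fun d e =>
        let d1 := d.setdefault e.1 ([] : List Int)
        let ns := d1.getD e.1 ([] : List Int)
        if e.2.1 ∈ ns then d1 else d1.insert e.1 (ns ++ [e.2.1])) d
    = edges.foldl
      (fun d e => d.modify e.1 PySem.Set.empty (fun s => PySem.Set.add s e.2.1)) d := by
  induction edges with
  | nil => intro d _; rfl
  | cons e tl ih =>
      intro d hnd
      simp only [List.foldl_cons]
      rw [pvStep_eq d e hnd]
      exact ih _ (pvKeys_modify_nodup d e.1 _ _ hnd)

theorem pvAdjA_keys (edges : List (Int × Int × Int)) :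
    (edges.foldl
      (fun d e => d.modify e.1 PySem.Set.empty (fun s => PySem.Set.add s e.2.1))
      PySem.Dict.empty).keys = PySem.Set.ofList (edges.map (·.1)) := by
  have h := PySem.Dict.keys_foldl_modify_key (κ := Int) (ν := PySem.Set Int)
    edges (fun e => e.1) PySem.Set.empty
    (fun _ e s => PySem.Set.add s e.2.1) PySem.Dict.empty
  rw [show (PySem.Dict.empty : PySem.Dict Int (PySem.Set Int)).keys = [] from rfl,
    PySem.Set.update_nil_left] at h
  exact h

theorem pvAdjA_targets (edges : List (Int × Int × Int)) :
    ∀ (d : PySem.Dict Int (PySem.Set Int)) (k n : Int),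
      n ∈ (edges.foldl
        (fun d e => d.modify e.1 PySem.Set.empty (fun s => PySem.Set.add s e.2.1)) d).getD
          k PySem.Set.empty →
      n ∈ d.getD k PySem.Set.empty ∨ n ∈ edges.map (·.2.1) := by
  induction edges with
  | nil => intro d k n h; exact Or.inl h
  | cons e tl ih =>
      intro d k n h
      simp only [List.foldl_cons] at h
      rcases ih _ k n h with h' | h'
      · show _ ∨ n ∈ e.2.1 :: tl.map (·.2.1)
        rw [show d.modify e.1 PySem.Set.empty (fun s => PySem.Set.add s e.2.1)
            = d.insert e.1 (PySem.Set.add (d.getD e.1 PySem.Set.empty) e.2.1) from rfl] at h'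
        rw [PySem.Dict.getD_insert] at h'
        by_cases hk : k = e.1
        · rw [if_pos hk] at h'
          rcases (PySem.Set.mem_add _ _ _).mp h' with h'' | h''
          · subst hk; exact Or.inl h''
          · exact Or.inr (h'' ▸ List.mem_cons_self)
        · rw [if_neg hk] at h'
          exact Or.inl h'
      · exact Or.inr (List.mem_cons_of_mem _ h')

-- ===== outer loop =====
theorem pvCountP_lt_length (l : List Int) (p : Int → Bool) (x : Int)
    (hx : x ∈ l) (hp : p x = false) : l.countP p < l.length := by
  rcases Nat.lt_or_ge (l.countP p) l.length with h | h
  · exact h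
  · exfalso
    have he : l.countP p = l.length := Nat.le_antisymm List.countP_le_length h
    have := List.countP_eq_length.mp he x hx
    rw [hp] at this; cases this

theorem pvOuter (adj : PySem.Dict Int (PySem.Set Int))
    (hclosed : ∀ k : Int, ∀ n ∈ adj.getD k PySem.Set.empty, adj.contains n = true)
    (F : Nat) (hF : adj.keys.length < F) :
    ∀ (rs : List Int) (vp0 : PySem.Dict Int (PySem.Set Int)),
      rs.Nodup →
      (∀ r ∈ rs, adj.contains r = true) →
      (∀ r ∈ rs, vp0.contains r = false) →
      rs.foldl (fun vp u => (dfs F u u vp adj PySem.Dict.empty).1) vp0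
        = rs.foldl
            (fun res u => res.insert u (get_valid_paths_loop adj [u] PySem.Set.empty)) vp0 := by
  intro rs
  induction rs with
  | nil => intro vp0 _ _ _; rfl
  | cons u tl ih =>
      intro vp0 hnd hcont hvp
      simp only [List.foldl_cons]
      obtain ⟨F', rfl⟩ : ∃ F'', F = F'' + 1 := ⟨F - 1, by omega⟩
      have hu : adj.contains u = true := hcont u List.mem_cons_self
      have hukeys : u ∈ adj.keys := (PySem.Dict.contains_iff_mem_keys adj u).mp hu
      have huvp : vp0.contains u = false := hvp u List.mem_cons_self
      -- one unfolding of dfs at the root u with empty visited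
      have hvis0 : (PySem.Dict.empty : PySem.Dict Int Bool).getD u false = false := rfl
      have hmk : (PySem.Dict.empty : PySem.Dict Int Bool).insert u true = pvMkTrue [u] := by
        apply PySem.Dict.ext
        rw [PySem.Dict.items_insert_of_not_contains _ _ rfl]
        rfl
      have hvp1 : vp0.modify u PySem.Set.empty (fun s => PySem.Set.add s u)
          = vp0.insert u ([u] : PySem.Set Int) := by
        show vp0.insert u (PySem.Set.add (vp0.getD u PySem.Set.empty) u) = _
        rw [PySem.Dict.getD_of_not_contains vp0 _ huvp]
        rfl
      have hdfs : dfs (F' + 1) u u vp0 adj PySem.Dict.empty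
          = (adj.getD u PySem.Set.empty).foldl
              (fun st m => dfs F' m u st.1 adj st.2)
              (vp0.insert u ([u] : PySem.Set Int), pvMkTrue [u]) := by
        rw [dfs, hvis0]
        simp only [Bool.false_eq_true, if_false]
        rw [hmk, hvp1]
      have hmu : pvUnvisited adj.keys ([u] : PySem.Set Int) < adj.keys.length := by
        apply pvCountP_lt_length _ _ u hukeys
        have : PySem.Set.contains ([u] : PySem.Set Int) u = true :=
          (PySem.Set.contains_iff _ _).mpr (List.mem_singleton_self u)
        rw [this]; rfl
      have hmain := pvMain adj hclosed (pvUnvisited adj.keys ([u] : PySem.Set Int))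
        (adj.getD u PySem.Set.empty) ([u] : PySem.Set Int) (le_refl _)
        (hclosed u) vp0 u F' (by omega)
      -- B's step
      have hloop : get_valid_paths_loop adj [u] PySem.Set.empty
          = get_valid_paths_loop adj (adj.getD u PySem.Set.empty) ([u] : PySem.Set Int) := by
        rw [get_valid_paths_loop, dif_neg (by exact fun h => by cases h)]
        cases hmm : adj.get? u with
        | none => rw [pvGet?_of_contains hu] at hmm; cases hmm
        | some ns' =>
            have he := (pvGet?_of_contains hu).symm.trans hmm
            injection he with he
            subst he
            dsimp only
            rw [List.append_nil]
            rfl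
      rw [hdfs, hmain]
      simp only
      rw [← hloop]
      -- recurse on the tail
      apply ih
      · exact hnd.of_cons
      · exact fun r hr => hcont r (List.mem_cons_of_mem _ hr)
      · intro r hr
        rw [PySem.Dict.contains_insert]
        have hru : r ≠ u := by
          intro he
          exact (List.nodup_cons.mp hnd).1 (he ▸ hr)
        simp only [hru, beq_iff_eq, if_false, Bool.or_eq_false_iff]
        exact ⟨by simp [hru], hvp r (List.mem_cons_of_mem _ hr)⟩

-- ===== final assembly =====
theorem pvFinal (edges : List (Int × Int × Int)) (hpre : Pre_get_valid_paths edges) :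
    get_valid_paths edges = get_valid_paths_alt edges := by
  unfold get_valid_paths get_valid_paths_alt
  rw [pvAdj_eq edges PySem.Dict.empty List.nodup_nil]
  have hkeys := pvAdjA_keys edges
  set adjA := edges.foldl
    (fun d e => d.modify e.1 PySem.Set.empty (fun s => PySem.Set.add s e.2.1))
    PySem.Dict.empty with hadjA
  have hclosed : ∀ k : Int, ∀ n ∈ adjA.getD k PySem.Set.empty, adjA.contains n = true := by
    intro k n hn
    rcases pvAdjA_targets edges PySem.Dict.empty k n hn with h | h
    · exact absurd h List.not_mem_nil
    · obtain ⟨e, he, hen⟩ := List.mem_map.mp h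
      have hsrc : e.2.1 ∈ edges.map (·.1) := hpre e he
      rw [PySem.Dict.contains_iff_mem_keys, hkeys]
      exact (PySem.Set.mem_ofList _ _).mpr (hen ▸ hsrc)
  have hF : adjA.keys.length < edges.length + 1 := by
    rw [hkeys]
    have h1 := PySem.Set.length_ofList_le (edges.map (·.1))
    rw [List.length_map] at h1
    omega
  have hout := pvOuter adjA hclosed (edges.length + 1) hF adjA.keys PySem.Dict.empty
    (hkeys ▸ PySem.Set.nodup_ofList (edges.map (·.1)))
    (fun r hr => (PySem.Dict.contains_iff_mem_keys adjA r).mpr hr)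
    (fun r _ => rfl)
  exact congrArg (fun d => d.items) hout

-- ===== VERDICT (by name: the statement is the Claim_ definition above) =====
theorem get_valid_paths_spec : Claim_equal_get_valid_paths := by
  intro edges _ hpre
  exact pvFinal edges hpre
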